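-- pv_equiv track=rewrite | github.com/PlutoaCharon/CodeExercise_Python | 剑指Offer/剑指 Offer 53 - I. 在排序数组中查找数字 I.py | search
-- ===== SOURCE A (Python) =====
-- def search(nums: [int], target: int) -> int:
--     if not nums:
--         return 0
--
--     # 查找第一个和最后一个元素
--     def find(is_find_first):
--         begin = 0
--         end = n - 1
--         # if和elif的逻辑跟正常的二分查找一样
--         while begin <= end:
--             mid = begin + (end - begin) // 2
--             if nums[mid] > target:
--                 end = mid - 1
--             elif nums[mid] < target:
--                 begin = mid + 1
--             # 找到目标值了，开始定位到第一个和最后一个位置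
--             else:
--                 # 查找第一个和最后一个逻辑很类似，这里用一个变量标记
--                 # 是查找第一个还是查找最后一个
--                 # True 查找左边界 False查找右边界
--                 if is_find_first:
--                     # 如果不满足条件，缩小右边界，继续往左边查找
--                     if mid > 0 and nums[mid] == nums[mid - 1]:
--                         end = mid - 1
--                     else:
--                         return mid
--                 else:
--                     # 如果不满足条件，增大左边界，继续往右边查找
--                     if mid < n - 1 and nums[mid] == nums[mid + 1]:
--                         begin = mid + 1
--                     else:
--                         return mid
--         return -1
--
--     n = len(nums)
--     return find(False) - find(True) + 1 if find(False) != -1 and find(True) != -1 else 0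
-- ===== SOURCE B (Python) =====
-- def search(nums: [int], target: int) -> int:
--     # simple one-pass tally; sortedness is irrelevant to the count
--     return nums.count(target)
-- ===== Notes on version B (the rewrite author's own statement) =====
-- stated objective: simpler
-- what changed: Replaced the pair of hand-written boundary binary searches with a single linear count of elements equal to target (list.count); Pre_ excludes unsorted lists that contain target, where A's binary searches return accidental values (inputs with target absent, sorted or not, are all inside Pre_).
-- outside the precondition, e.g. on search([1, 0, 1], 1): A returns 1, B returns 2
import Mathlib
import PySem

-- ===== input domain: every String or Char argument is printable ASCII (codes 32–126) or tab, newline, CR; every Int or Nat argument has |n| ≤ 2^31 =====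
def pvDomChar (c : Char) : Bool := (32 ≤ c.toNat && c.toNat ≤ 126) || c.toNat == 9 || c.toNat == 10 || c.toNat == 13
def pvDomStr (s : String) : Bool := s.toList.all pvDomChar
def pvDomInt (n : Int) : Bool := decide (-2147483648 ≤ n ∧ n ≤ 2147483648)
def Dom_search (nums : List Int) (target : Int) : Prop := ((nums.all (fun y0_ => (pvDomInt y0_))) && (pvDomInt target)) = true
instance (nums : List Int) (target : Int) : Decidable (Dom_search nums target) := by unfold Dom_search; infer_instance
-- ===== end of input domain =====

-- B replaces the two hand-written boundary binary searches by a single linear count (simpler; not faster).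

-- ===== PORT A =====
-- nums[i]; inside findA the index is always in range (0 ≤ b ≤ mid ≤ e ≤ n-1), so the
-- `.getD 0` default is never consulted where Python would raise.
def getA (nums : List Int) (i : Int) : Int := (PySem.List.pyGet? nums i).getD 0

-- mid = begin + (end - begin) // 2
def midA (b e : Int) : Int := b + PySem.Int.floordiv (e - b) 2

lemma midA_bounds {b e : Int} (h : b ≤ e) : b ≤ midA b e ∧ midA b e ≤ e := by
  unfold midA
  rw [PySem.Int.floordiv_eq_ediv_of_pos (by omega : (0:Int) < 2)]
  omega

-- the inner `find` closure of A: while-loop as recursion on the shrinking window [b, e]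
def findA (nums : List Int) (target : Int) (isFirst : Bool) (b e : Int) : Int :=
  if h : b ≤ e then
    if getA nums (midA b e) > target then findA nums target isFirst b (midA b e - 1)
    else if getA nums (midA b e) < target then findA nums target isFirst (midA b e + 1) e
    else if isFirst then
      if midA b e > 0 ∧ getA nums (midA b e) = getA nums (midA b e - 1) then
        findA nums target isFirst b (midA b e - 1)
      else midA b e
    else
      if midA b e < (nums.length : Int) - 1 ∧ getA nums (midA b e) = getA nums (midA b e + 1) then
        findA nums target isFirst (midA b e + 1) e
      else midA b e
  else -1
termination_by (e + 1 - b).toNat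
decreasing_by
  all_goals have := midA_bounds h
  all_goals omega

def search (nums : List Int) (target : Int) : Int :=
  if nums = [] then 0
  else
    let n : Int := nums.length
    if findA nums target false 0 (n - 1) ≠ -1 ∧ findA nums target true 0 (n - 1) ≠ -1 then
      findA nums target false 0 (n - 1) - findA nums target true 0 (n - 1) + 1
    else 0

-- ===== PORT B =====
def search_alt (nums : List Int) (target : Int) : Int :=
  (PySem.List.count nums target : Int)

-- ===== PRECONDITION & SPEC =====
-- Pre_ excludes unsorted lists that contain target (outside the function's natural domain of
-- sorted input): there A's binary searches can miss occurrences and return an accidental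
-- value (e.g. nums=[1,0,1], target=1 gives 1, not the count 2); when target is absent A
-- provably returns 0 on any list, so those inputs stay inside Pre_.
def Pre_search (nums : List Int) (target : Int) : Prop :=
  List.Pairwise (· ≤ ·) nums ∨ target ∉ nums
instance (nums : List Int) (target : Int) : Decidable (Pre_search nums target) := by
  unfold Pre_search; infer_instance
def pvWitness_search : List Int × Int := ([1, 2, 2, 3], 2)
def Spec_search (nums : List Int) (target : Int) (out : Int) : Prop := out = search_alt nums target
instance (nums : List Int) (target : Int) (out : Int) : Decidable (Spec_search nums target out) := by unfold Spec_search; infer_instance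

-- ===== CLAIM (what is proved, stated in full; the proofs are below) =====
def Claim_equal_search : Prop := ∀ (nums : List Int) (target : Int), Dom_search nums target → Pre_search nums target → Spec_search nums target (search nums target)

-- ===== LEMMAS AND PROOFS =====

-- a sorted list splits into the part below, the block equal to, and the part above target
lemma sorted_split (nums : List Int) (t : Int) (h : List.Pairwise (· ≤ ·) nums) :
    ∃ A B C : List Int, nums = A ++ B ++ C ∧ (∀ x ∈ A, x < t) ∧ (∀ x ∈ B, x = t) ∧
      (∀ x ∈ C, t < x) := by
  induction nums with
  | nil => exact ⟨[], [], [], rfl, by simp, by simp, by simp⟩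
  | cons x xs ih =>
    obtain ⟨hx, hp⟩ := List.pairwise_cons.mp h
    obtain ⟨A, B, C, hABC, hA, hB, hC⟩ := ih hp
    rcases lt_trichotomy x t with hlt | heq | hgt
    · refine ⟨x :: A, B, C, by simp [hABC], ?_, hB, hC⟩
      intro y hy
      rcases List.mem_cons.mp hy with rfl | hy
      · exact hlt
      · exact hA y hy
    · have hA0 : A = [] := by
        cases A with
        | nil => rfl
        | cons a as =>
          exfalso
          have h1 := hA a (by simp)
          have h2 := hx a (by rw [hABC]; simp)
          omega
      refine ⟨[], x :: B, C, by simp [hABC, hA0], by simp, ?_, hC⟩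
      intro y hy
      rcases List.mem_cons.mp hy with rfl | hy
      · exact heq
      · exact hB y hy
    · have hA0 : A = [] := by
        cases A with
        | nil => rfl
        | cons a as =>
          exfalso
          have h1 := hA a (by simp)
          have h2 := hx a (by rw [hABC]; simp)
          omega
      have hB0 : B = [] := by
        cases B with
        | nil => rfl
        | cons bb bs =>
          exfalso
          have h1 := hB bb (by simp)
          have h2 := hx bb (by rw [hABC]; simp)
          omega
      refine ⟨[], [], x :: C, by simp [hABC, hA0, hB0], by simp, by simp, ?_⟩
      intro y hy
      rcases List.mem_cons.mp hy with rfl | hy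
      · exact hgt
      · exact hC y hy

lemma getA_seg (A B C : List Int) (t : Int)
    (hA : ∀ x ∈ A, x < t) (hB : ∀ x ∈ B, x = t) (hC : ∀ x ∈ C, t < x)
    (i : Int) (h0 : 0 ≤ i) (h1 : i < (A.length : Int) + B.length + C.length) :
    (i < (A.length : Int) → getA (A ++ B ++ C) i < t) ∧
    ((A.length : Int) ≤ i → i < (A.length : Int) + B.length → getA (A ++ B ++ C) i = t) ∧
    ((A.length : Int) + B.length ≤ i → t < getA (A ++ B ++ C) i) := by
  have hlenI : i < ((A ++ B ++ C).length : Int) := by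
    rw [List.length_append, List.length_append]; push_cast; omega
  have hlen : i.toNat < (A ++ B ++ C).length := by omega
  have hget : getA (A ++ B ++ C) i = (A ++ B ++ C)[i.toNat]'hlen := by
    rw [getA, PySem.List.pyGet?_eq_some_getElem _ h0 hlenI]; rfl
  have hAB : (A ++ B).length = A.length + B.length := List.length_append
  refine ⟨?_, ?_, ?_⟩
  · intro hi
    have hj : i.toNat < A.length := by omega
    rw [hget, List.getElem_append_left (by omega : i.toNat < (A ++ B).length),
      List.getElem_append_left hj]
    exact hA _ (A.getElem_mem hj)
  · intro hi1 hi2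
    have hj1 : A.length ≤ i.toNat := by omega
    have hj2 : i.toNat - A.length < B.length := by omega
    rw [hget, List.getElem_append_left (by omega : i.toNat < (A ++ B).length),
      List.getElem_append_right hj1]
    exact hB _ (B.getElem_mem hj2)
  · intro hi
    have hj1 : (A ++ B).length ≤ i.toNat := by omega
    rw [hget, List.getElem_append_right hj1]
    exact hC _ (C.getElem_mem (by omega))

lemma getA_mem (nums : List Int) (i : Int) (h0 : 0 ≤ i) (h1 : i < (nums.length : Int)) :
    getA nums i ∈ nums := by
  rw [getA, PySem.List.pyGet?_eq_some_getElem _ h0 h1]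
  exact nums.getElem_mem (by omega)

-- when no in-range element equals target, the loop runs to exhaustion and yields -1
lemma findA_notfound (nums : List Int) (t : Int)
    (hne : ∀ i : Int, 0 ≤ i → i < (nums.length : Int) → getA nums i ≠ t) (f : Bool) :
    ∀ k : ℕ, ∀ b e : Int, (e + 1 - b).toNat ≤ k → 0 ≤ b →
      e ≤ (nums.length : Int) - 1 →
      findA nums t f b e = -1 := by
  intro k
  induction k with
  | zero =>
    intro b e hk h0 he
    rw [findA, dif_neg (by omega)]
  | succ k ih =>
    intro b e hk h0 he
    by_cases hbe : b ≤ e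
    · obtain ⟨hm1, hm2⟩ := midA_bounds hbe
      have hv := hne (midA b e) (by omega) (by omega)
      rcases lt_trichotomy (getA nums (midA b e)) t with hlt | heq | hgt
      · rw [findA, dif_pos hbe, if_neg (by omega), if_pos hlt]
        exact ih (midA b e + 1) e (by omega) (by omega) he
      · exact absurd heq hv
      · rw [findA, dif_pos hbe, if_pos hgt]
        exact ih b (midA b e - 1) (by omega) h0 (by omega)
    · rw [findA, dif_neg hbe]

lemma findA_first (A B C : List Int) (t : Int)
    (hA : ∀ x ∈ A, x < t) (hB : ∀ x ∈ B, x = t) (hC : ∀ x ∈ C, t < x) (hq : B ≠ []) :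
    ∀ k : ℕ, ∀ b e : Int, (e + 1 - b).toNat ≤ k → 0 ≤ b →
      e ≤ (A.length : Int) + B.length + C.length - 1 →
      b ≤ (A.length : Int) → (A.length : Int) ≤ e →
      findA (A ++ B ++ C) t true b e = A.length := by
  have hqpos : 0 < B.length := List.length_pos_iff.mpr hq
  intro k
  induction k with
  | zero => intro b e hk h0 he hb hp; omega
  | succ k ih =>
    intro b e hk h0 he hb hp
    have hbe : b ≤ e := by omega
    obtain ⟨hm1, hm2⟩ := midA_bounds hbe
    obtain ⟨hs1, hs2, hs3⟩ := getA_seg A B C t hA hB hC (midA b e) (by omega) (by omega)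
    by_cases h1 : midA b e < (A.length : Int)
    · -- mid is left of the block: nums[mid] < target, move begin right
      have hv := hs1 h1
      rw [findA, dif_pos hbe, if_neg (by omega), if_pos hv]
      exact ih (midA b e + 1) e (by omega) (by omega) he (by omega) hp
    · by_cases h2 : midA b e < (A.length : Int) + B.length
      · -- mid is inside the block of targets
        have hv := hs2 (by omega) h2
        rw [findA, dif_pos hbe, if_neg (by omega), if_neg (by omega), if_pos rfl]
        by_cases hp' : midA b e = (A.length : Int)
        · -- mid is already the first occurrence
          rw [if_neg ?_, hp']
          rintro ⟨hc1, hc2⟩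
          obtain ⟨hs1', -, -⟩ := getA_seg A B C t hA hB hC (midA b e - 1)
            (by omega) (by omega)
          have := hs1' (by omega)
          omega
        · -- a duplicate sits just left of mid: shrink the right end
          obtain ⟨-, hs2', -⟩ := getA_seg A B C t hA hB hC (midA b e - 1)
            (by omega) (by omega)
          have hv' := hs2' (by omega) (by omega)
          rw [if_pos ⟨by omega, by omega⟩]
          exact ih b (midA b e - 1) (by omega) h0 (by omega) hb (by omega)
      · -- mid is right of the block: nums[mid] > target, move end left
        have hv := hs3 (by omega)
        rw [findA, dif_pos hbe, if_pos hv]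
        exact ih b (midA b e - 1) (by omega) h0 (by omega) hb (by omega)

lemma findA_last (A B C : List Int) (t : Int)
    (hA : ∀ x ∈ A, x < t) (hB : ∀ x ∈ B, x = t) (hC : ∀ x ∈ C, t < x) (hq : B ≠ []) :
    ∀ k : ℕ, ∀ b e : Int, (e + 1 - b).toNat ≤ k → 0 ≤ b →
      e ≤ (A.length : Int) + B.length + C.length - 1 →
      b ≤ (A.length : Int) + B.length - 1 → (A.length : Int) + B.length - 1 ≤ e →
      findA (A ++ B ++ C) t false b e = (A.length : Int) + B.length - 1 := by
  have hqpos : 0 < B.length := List.length_pos_iff.mpr hq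
  have hn : ((A ++ B ++ C).length : Int) = (A.length : Int) + B.length + C.length := by
    rw [List.length_append, List.length_append]; push_cast; ring
  intro k
  induction k with
  | zero => intro b e hk h0 he hb hp; omega
  | succ k ih =>
    intro b e hk h0 he hb hp
    have hbe : b ≤ e := by omega
    obtain ⟨hm1, hm2⟩ := midA_bounds hbe
    obtain ⟨hs1, hs2, hs3⟩ := getA_seg A B C t hA hB hC (midA b e) (by omega) (by omega)
    by_cases h1 : midA b e < (A.length : Int)
    · have hv := hs1 h1
      rw [findA, dif_pos hbe, if_neg (by omega), if_pos hv]
      exact ih (midA b e + 1) e (by omega) (by omega) he (by omega) hp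
    · by_cases h2 : midA b e < (A.length : Int) + B.length
      · have hv := hs2 (by omega) h2
        rw [findA, dif_pos hbe, if_neg (by omega), if_neg (by omega), if_neg (by simp)]
        by_cases hp' : midA b e = (A.length : Int) + B.length - 1
        · -- mid is already the last occurrence
          rw [if_neg ?_, hp']
          rintro ⟨hc1, hc2⟩
          rw [hn] at hc1
          obtain ⟨-, -, hs3'⟩ := getA_seg A B C t hA hB hC (midA b e + 1)
            (by omega) (by omega)
          have := hs3' (by omega)
          omega
        · -- a duplicate sits just right of mid: move begin right
          obtain ⟨-, hs2', -⟩ := getA_seg A B C t hA hB hC (midA b e + 1)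
            (by omega) (by omega)
          have hv' := hs2' (by omega) (by omega)
          rw [if_pos ⟨by rw [hn]; omega, by omega⟩]
          exact ih (midA b e + 1) e (by omega) (by omega) he (by omega) hp
      · have hv := hs3 (by omega)
        rw [findA, dif_pos hbe, if_pos hv]
        exact ih b (midA b e - 1) (by omega) h0 (by omega) hb (by omega)

lemma count_split (A B C : List Int) (t : Int)
    (hA : ∀ x ∈ A, x < t) (hB : ∀ x ∈ B, x = t) (hC : ∀ x ∈ C, t < x) :
    PySem.List.count (A ++ B ++ C) t = B.length := by
  rw [PySem.List.count_eq, List.count_append, List.count_append]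
  rw [List.count_eq_zero.mpr (fun h => absurd (hA _ h) (lt_irrefl t)),
    List.count_eq_zero.mpr (fun h => absurd (hC _ h) (lt_irrefl t)),
    List.count_eq_length.mpr (fun x hx => (hB x hx).symm)]
  omega

-- ===== VERDICT (by name: the statement is the Claim_ definition above) =====
theorem search_spec : Claim_equal_search := by
  intro nums target _ hpre
  unfold Spec_search search search_alt
  by_cases hmem : target ∈ nums
  · -- target occurs: Pre_ gives sortedness, so the block decomposition applies
    have hsort : List.Pairwise (· ≤ ·) nums := hpre.resolve_right (fun h => h hmem)
    obtain ⟨A, B, C, hABC, hA, hB, hC⟩ := sorted_split nums target hsort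
    subst hABC
    have hnil : A ++ B ++ C ≠ [] := by rintro h; rw [h] at hmem; simp at hmem
    have hq : B ≠ [] := by
      rintro rfl
      rcases List.mem_append.mp hmem with h | h
      · rcases List.mem_append.mp h with h | h
        · exact absurd (hA _ h) (lt_irrefl target)
        · simp at h
      · exact absurd (hC _ h) (lt_irrefl target)
    have hqpos : 0 < B.length := List.length_pos_iff.mpr hq
    have hn : ((A ++ B ++ C).length : Int) = (A.length : Int) + B.length + C.length := by
      rw [List.length_append, List.length_append]; push_cast; ring
    rw [if_neg hnil]
    simp only []
    have hA0 : (0:Int) ≤ (A.length : Int) := by positivity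
    have hC0 : (0:Int) ≤ (C.length : Int) := by positivity
    have hlast : findA (A ++ B ++ C) target false 0
        (((A ++ B ++ C).length : Int) - 1) = (A.length : Int) + B.length - 1 := by
      refine findA_last A B C target hA hB hC hq _ 0 _ le_rfl (by omega)
        (by rw [hn]) (by omega) (by rw [hn]; omega)
    have hfirst : findA (A ++ B ++ C) target true 0
        (((A ++ B ++ C).length : Int) - 1) = (A.length : Int) := by
      refine findA_first A B C target hA hB hC hq _ 0 _ le_rfl (by omega)
        (by rw [hn]) (by omega) (by rw [hn]; omega)
    rw [hlast, hfirst, if_pos ⟨by omega, by omega⟩]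
    rw [count_split A B C target hA hB hC]
    omega
  · -- target absent (sorted or not): the loop exhausts, A returns 0, and the count is 0
    have hcnt : PySem.List.count nums target = 0 := by
      rw [PySem.List.count_eq]
      exact List.count_eq_zero.mpr hmem
    by_cases hnil : nums = []
    · rw [if_pos hnil, hcnt]; simp
    · rw [if_neg hnil]
      simp only []
      have hnf : ∀ f, findA nums target f 0 ((nums.length : Int) - 1) = -1 := by
        intro f
        refine findA_notfound nums target ?_ f _ 0 _ le_rfl (by omega) (by omega)
        intro i h0 h1 hEq
        exact hmem (hEq ▸ getA_mem nums i h0 h1)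
      rw [hnf, hnf, if_neg (by simp), hcnt]
      simp
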